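-- pv_equiv track=rewrite | github.com/niimet/Integers-to-Roman | intToRoman.py | nums
-- ===== SOURCE A (Python) =====
-- def nums(length):
--     numitself = length
--     length = len(length)
--
--     if numitself[0] == "0":
--         return ""
--
--     if length == 1:
--         bir = "I"
--         bes = "V"
--         on = "X"
--     elif length == 2:
--         bir = "X"
--         bes = "L"
--         on = "C"
--     elif length == 3:
--         bir = "C"
--         bes = "D"
--         on = "M"
--     elif length == 4:
--         bir = "M"
--         bes = "D"
--         on = "M"
--
--     str_ = ""
--     if int(numitself[0]) >= 1 and int(numitself[0]) <= 3:
--         for roma in range(int(numitself[0])) :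
--             str_ += f"{bir}"
--
--     elif int(numitself[0]) == 4:
--         str_ += f"{bir}{bes}"
--
--     elif int(numitself[0]) >= 5 and int(numitself[0]) <= 8:
--         str_ = f"{bes}"
--
--         for roma in range(5,int(numitself[0])):
--             str_ += f"{bir}"
--
--     elif int(numitself[0]) == 9:
--         str_ += f"{bir}{on}"
--     elif int(numitself[0]) == 10:
--         str_ += f"{on}"
--
--     return str_
-- ===== SOURCE B (Python) =====
-- def nums(length):
--     numitself = length
--     if numitself[0] == "0":
--         return ""
--     bir, bes, on = [("I", "V", "X"), ("X", "L", "C"), ("C", "D", "M"), ("M", "D", "M")][len(length) - 1]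
--     d = int(numitself[0])
--     pattern = ["", bir, bir * 2, bir * 3, bir + bes, bes,
--                bes + bir, bes + bir * 2, bes + bir * 3, bir + on]
--     return pattern[d]
-- ===== Notes on version B (the rewrite author's own statement) =====
-- stated objective: simpler
-- what changed: The per-digit if/elif cascade with its two hand-unrolled repetition loops is replaced by two data tables: a tuple list indexed by len(length)-1 selecting the symbols, and a precomputed ten-entry Roman-pattern list indexed by the digit value.
import Mathlib
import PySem

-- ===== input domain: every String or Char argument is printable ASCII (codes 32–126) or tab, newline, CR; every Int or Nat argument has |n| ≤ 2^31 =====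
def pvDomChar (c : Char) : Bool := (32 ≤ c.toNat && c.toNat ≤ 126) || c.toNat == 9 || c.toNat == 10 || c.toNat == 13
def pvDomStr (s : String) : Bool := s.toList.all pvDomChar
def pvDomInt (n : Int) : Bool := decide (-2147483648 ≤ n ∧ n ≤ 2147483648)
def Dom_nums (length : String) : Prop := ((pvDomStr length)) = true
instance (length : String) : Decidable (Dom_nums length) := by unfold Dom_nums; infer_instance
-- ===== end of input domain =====

-- B replaces A's per-digit branch/loop cascade with two lookup tables (simpler, same cost).

-- ===== PORT A =====
-- the length-based if/elif assigning bir/bes/on; none = the symbols stay unassigned (UnboundLocalError)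
def numsSymbols (len : Int) : Option (List Char × List Char × List Char) :=
  if len = 1 then some (['I'], ['V'], ['X'])
  else if len = 2 then some (['X'], ['L'], ['C'])
  else if len = 3 then some (['C'], ['D'], ['M'])
  else if len = 4 then some (['M'], ['D'], ['M'])
  else none

def nums (length : String) : String :=
  let numitself := length.toList
  let len : Int := PySem.Chars.len numitself
  match PySem.List.pyGet? numitself 0 with      -- numitself[0]; none = IndexError
  | none => ""
  | some c0 =>
    if c0 = '0' then "" else
    match numsSymbols len with
    | none => ""                                 -- UnboundLocalError on length ≥ 5
    | some (bir, bes, on) =>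
      match PySem.Int.ofChars? [c0] with         -- int(numitself[0]); none = ValueError
      | none => ""
      | some d =>
        String.ofList (
          if 1 ≤ d ∧ d ≤ 3 then
            (PySem.List.pyRange 0 d 1).foldl (fun acc _ => acc ++ bir) []
          else if d = 4 then [] ++ bir ++ bes
          else if 5 ≤ d ∧ d ≤ 8 then
            (PySem.List.pyRange 5 d 1).foldl (fun acc _ => acc ++ bir) bes
          else if d = 9 then [] ++ bir ++ on
          else if d = 10 then [] ++ on
          else [])

-- ===== PORT B =====
def numsTriples : List (List Char × List Char × List Char) :=
  [(['I'], ['V'], ['X']), (['X'], ['L'], ['C']), (['C'], ['D'], ['M']), (['M'], ['D'], ['M'])]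

def numsPattern (bir bes on : List Char) : List (List Char) :=
  [[], bir, bir ++ bir, bir ++ bir ++ bir, bir ++ bes, bes,
   bes ++ bir, bes ++ bir ++ bir, bes ++ bir ++ bir ++ bir, bir ++ on]

def nums_alt (length : String) : String :=
  let numitself := length.toList
  match PySem.List.pyGet? numitself 0 with       -- numitself[0]; none = IndexError
  | none => ""
  | some c0 =>
    if c0 = '0' then "" else
    match PySem.List.pyGet? numsTriples (PySem.Chars.len numitself - 1) with  -- [...][len-1]
    | none => ""                                  -- IndexError on length ≥ 5
    | some (bir, bes, on) =>
      match PySem.Int.ofChars? [c0] with          -- int(numitself[0])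
      | none => ""
      | some d =>
        match PySem.List.pyGet? (numsPattern bir bes on) d with  -- pattern[d]
        | none => ""
        | some r => String.ofList r

-- ===== PRECONDITION & SPEC =====
-- Pre_ excludes exactly the inputs where A raises: the empty string (IndexError), a non-digit
-- first character (ValueError in int), and length ≥ 5 with a nonzero leading digit
-- (UnboundLocalError: the symbols are never assigned).
def Pre_nums (length : String) : Prop :=
  length.toList ≠ [] ∧
  length.toList.headI ∈ ['0','1','2','3','4','5','6','7','8','9'] ∧
  (length.toList.headI = '0' ∨ length.toList.length ≤ 4)
instance (length : String) : Decidable (Pre_nums length) := by unfold Pre_nums; infer_instance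

def pvWitness_nums : String := "47"

def Spec_nums (length : String) (out : String) : Prop := out = nums_alt length
instance (length : String) (out : String) : Decidable (Spec_nums length out) := by unfold Spec_nums; infer_instance

-- ===== CLAIM (what is proved, stated in full; the proofs are below) =====
def Claim_equal_nums : Prop := ∀ (length : String), Dom_nums length → Pre_nums length → Spec_nums length (nums length)

-- ===== LEMMAS AND PROOFS =====

-- ===== VERDICT (by name: the statement is the Claim_ definition above) =====
theorem nums_spec : Claim_equal_nums := by
  intro s _ hpre
  obtain ⟨hne, hmem, hor⟩ := hpre
  obtain ⟨c, rest, hcs⟩ := List.exists_cons_of_ne_nil hne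
  rw [hcs] at hmem hor
  simp only [List.headI] at hmem hor
  unfold Spec_nums nums nums_alt
  rw [hcs]
  fin_cases hmem
  · simp
  all_goals (
    rcases hor with h0 | hlen
    · exact absurd h0 (by decide)
    · rcases rest with _ | ⟨a, _ | ⟨b, _ | ⟨c2, _ | ⟨d, t⟩⟩⟩⟩
      · rfl
      · rfl
      · rfl
      · rfl
      · simp only [List.length_cons] at hlen; omega)
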